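-- pv_equiv track=rewrite | github.com/sozelfist/Python-Fundamentals | algorithms/graph/cyclic/cycle.py | find_cycle
-- ===== SOURCE A (Python) =====
-- def find_cycle(graph: dict[int, list[int]]) -> set[int] | None:
--     """
--     Given an undirected graph, returns a list of nodes that form a cycle in
--     the graph, if one exists. Returns None if no cycle is found.
--     """
--     if not graph:
--         return None
--
--     visited = set()
--
--     def dfs(node: int, parent: int | None) -> tuple[bool, list[int]] | None:
--         visited.add(node)
--         for neighbor in graph.get(node, []):
--             if neighbor not in visited:
--                 result = dfs(neighbor, node)
--                 if result is not None and result[0]: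
--                     return True, result[1] + [node]
--             elif neighbor != parent:
--                 return True, [node, neighbor]
--         return False, []
--
--     for node in graph:
--         if node not in visited:
--             result = dfs(node, None)
--             if result is not None and result[0]:
--                 # Reverse the list to get the correct order
--                 return set(result[1][::-1])
--     return None
-- ===== SOURCE B (Python) =====
-- def find_cycle(graph: dict[int, list[int]]) -> set[int] | None:
--     """Iterative DFS with an explicit stack of (node, parent, remaining-neighbors)
--     frames; on the first back edge the cycle set is read off the stack directly."""
--     visited = set()
--     for root in graph:
--         if root in visited:
--             continue
--         visited.add(root)
--         stack = [(root, None, graph.get(root, []))]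
--         while stack:
--             node, parent, remaining = stack[-1]
--             if not remaining:
--                 stack.pop()
--                 continue
--             nb, remaining = remaining[0], remaining[1:]
--             stack[-1] = (node, parent, remaining)
--             if nb not in visited:
--                 visited.add(nb)
--                 stack.append((nb, node, graph.get(nb, [])))
--             elif nb != parent:
--                 return set([f[0] for f in stack[:-1]] + [nb, node])
--     return None
-- ===== Notes on version B (the rewrite author's own statement) =====
-- stated objective: alternative
-- what changed: The recursive closure-based DFS that propagates a (flag, path) pair upward and reverses it at the top is replaced by an iterative DFS over an explicit stack of (node, parent, remaining-neighbors) frames, and the cycle set is read directly off the stack at the first back edge.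
import Mathlib
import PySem

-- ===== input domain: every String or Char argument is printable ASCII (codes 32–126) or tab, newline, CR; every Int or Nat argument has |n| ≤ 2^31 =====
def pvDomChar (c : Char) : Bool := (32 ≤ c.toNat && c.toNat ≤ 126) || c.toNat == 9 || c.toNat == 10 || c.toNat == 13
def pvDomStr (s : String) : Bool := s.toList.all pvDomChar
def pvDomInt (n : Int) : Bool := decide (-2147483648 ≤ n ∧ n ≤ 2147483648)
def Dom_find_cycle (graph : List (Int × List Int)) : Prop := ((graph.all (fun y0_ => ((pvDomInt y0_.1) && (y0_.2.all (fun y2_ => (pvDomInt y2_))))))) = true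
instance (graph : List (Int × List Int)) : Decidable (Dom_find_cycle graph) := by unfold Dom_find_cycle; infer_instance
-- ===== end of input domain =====

-- B re-implements A's recursive closure-based DFS as an iterative DFS over an explicit
-- stack of (node, parent, remaining-neighbors) frames (objective: alternative, same cost).

-- graph.get(node, []) — shared dict primitive
def pvGet (graph : List (Int × List Int)) (node : Int) : List Int :=
  PySem.Dict.getD (PySem.Dict.mk graph) node []

-- ===== PORT A =====
-- the 'for neighbor in graph.get(node, [])' loop of dfs; `rec` is the recursive call dfs(·,·)
def pvGoA (rec : Int → Option Int → PySem.Set Int → Option ((Bool × List Int) × PySem.Set Int))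
    (node : Int) (parent : Option Int) :
    List Int → PySem.Set Int → Option ((Bool × List Int) × PySem.Set Int)
  | [], visited => some ((false, []), visited)
  | nb :: rest, visited =>
    if ¬ visited.contains nb then
      match rec nb (some node) visited with
      | none => none
      | some ((true, path), v') => some ((true, path ++ [node]), v')
      | some ((false, _), v') => pvGoA rec node parent rest v'
    else if some nb ≠ parent then
      some ((true, [node, nb]), visited)
    else
      pvGoA rec node parent rest visited

-- dfs(node, parent); the mutable closure set `visited` is threaded through the result;
-- fuel only makes the recursion structural (none = fuel exhausted, proved unreachable below)
def pvDfsA (graph : List (Int × List Int)) :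
    Nat → Int → Option Int → PySem.Set Int → Option ((Bool × List Int) × PySem.Set Int)
  | 0, _, _, _ => none
  | fuel + 1, node, parent, visited =>
    pvGoA (pvDfsA graph fuel) node parent (pvGet graph node) (visited.add node)

-- the 'for node in graph' loop; result[1][::-1] is reverse (PySem.List.slice?_none_none_neg_one)
def pvOuterA (graph : List (Int × List Int)) :
    List (Int × List Int) → PySem.Set Int → Option (List Int)
  | [], _ => none
  | (node, _) :: rest, visited =>
    if ¬ visited.contains node then
      match pvDfsA graph (graph.length + 1) node none visited with
      | none => none
      | some ((true, path), _) => some (PySem.Set.ofList path.reverse)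
      | some ((false, _), v') => pvOuterA graph rest v'
    else
      pvOuterA graph rest visited

def find_cycle (graph : List (Int × List Int)) : Option (List Int) :=
  if graph = [] then none else pvOuterA graph graph PySem.Set.empty

-- ===== PORT B =====
-- termination measure for the while loop: unvisited keys weighted heavy, plus frame sizes
def pvW (graph : List (Int × List Int)) : Nat :=
  2 * (graph.map (fun e => e.2.length)).foldr max 0 + 2

def pvUnvis (graph : List (Int × List Int)) (visited : PySem.Set Int) : Nat :=
  ((graph.map Prod.fst).toFinset.filter (fun x => ¬ visited.contains x)).card

def pvPhi (graph : List (Int × List Int)) (stack : List (Int × Option Int × List Int))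
    (visited : PySem.Set Int) : Nat :=
  pvW graph * pvUnvis graph visited + (stack.map (fun f => 2 * f.2.2.length + 1)).sum

theorem pvFoldrMax_le (l : List Nat) (x : Nat) (h : x ∈ l) : x ≤ l.foldr max 0 := by
  induction l with
  | nil => cases h
  | cons a t ih =>
    rcases List.mem_cons.1 h with h | h
    · simp [h]
    · exact le_trans (ih h) (by simp)

theorem pvGet_len_lt_W (graph : List (Int × List Int)) (x : Int) :
    2 * (pvGet graph x).length < pvW graph := by
  unfold pvGet pvW PySem.Dict.getD PySem.Dict.get?
  cases hf : List.find? (fun p => p.1 == x) (PySem.Dict.mk graph).items with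
  | none => simp
  | some p =>
    have hmem : p ∈ graph := List.mem_of_find?_eq_some hf
    have : p.2.length ≤ (graph.map (fun e => e.2.length)).foldr max 0 :=
      pvFoldrMax_le _ _ (List.mem_map.2 ⟨p, hmem, rfl⟩)
    simp
    omega

theorem pvGet_nil_of_not_key (graph : List (Int × List Int)) (x : Int)
    (h : x ∉ graph.map Prod.fst) : pvGet graph x = [] := by
  unfold pvGet
  simp [PySem.Dict.getD, PySem.Dict.get?]
  rw [List.find?_eq_none.2]
  · rfl
  · intro p hp hb
    exact h (List.mem_map.2 ⟨p, hp, by simpa using hb⟩)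

theorem pvContains_add_of_contains (v : PySem.Set Int) (x y : Int)
    (h : v.contains y = true) : (v.add x).contains y = true := by
  simp only [PySem.Set.contains, List.contains_iff_mem] at *
  exact (PySem.Set.mem_add v x y).2 (Or.inl h)

theorem pvUnvis_add_le (graph : List (Int × List Int)) (visited : PySem.Set Int) (x : Int) :
    pvUnvis graph (visited.add x) ≤ pvUnvis graph visited := by
  unfold pvUnvis
  apply Finset.card_le_card
  intro y hy
  simp only [Finset.mem_filter] at *
  refine ⟨hy.1, fun hc => hy.2 (pvContains_add_of_contains _ _ _ hc)⟩

theorem pvUnvis_add_lt (graph : List (Int × List Int)) (visited : PySem.Set Int) (x : Int)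
    (hk : x ∈ graph.map Prod.fst) (hv : ¬ visited.contains x) :
    pvUnvis graph (visited.add x) < pvUnvis graph visited := by
  unfold pvUnvis
  apply Finset.card_lt_card
  constructor
  · intro y hy
    simp only [Finset.mem_filter] at *
    refine ⟨hy.1, fun hc => hy.2 (pvContains_add_of_contains _ _ _ hc)⟩
  · intro hsub
    have hx : x ∈ (graph.map Prod.fst).toFinset.filter (fun y => ¬ visited.contains y) := by
      simp only [Finset.mem_filter, List.mem_toFinset]
      exact ⟨hk, hv⟩
    have := hsub hx
    simp only [Finset.mem_filter] at this
    exact this.2 (by simp)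

-- the 'while stack:' loop; first component some = early return, (none, v) = loop finished
def pvLoopB (graph : List (Int × List Int)) :
    List (Int × Option Int × List Int) → PySem.Set Int → Option (List Int) × PySem.Set Int
  | [], visited => (none, visited)
  | (node, parent, remaining) :: rest, visited =>
    match remaining with
    | [] => pvLoopB graph rest visited
    | nb :: rem' =>
      if ¬ visited.contains nb then
        pvLoopB graph ((nb, some node, pvGet graph nb) :: (node, parent, rem') :: rest)
          (visited.add nb)
      else if some nb ≠ parent then
        (some (PySem.Set.ofList ((rest.map (fun f => f.1)).reverse ++ [nb, node])), visited)
      else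
        pvLoopB graph ((node, parent, rem') :: rest) visited
termination_by stack visited => pvPhi graph stack visited
decreasing_by
  · simp only [pvPhi, List.map_cons, List.sum_cons]; omega
  · rename_i hnb
    have hnb' : ¬ visited.contains nb := by simpa using hnb
    by_cases hk : nb ∈ graph.map Prod.fst
    · have h1 : pvUnvis graph (visited.add nb) + 1 ≤ pvUnvis graph visited :=
        pvUnvis_add_lt graph visited nb hk hnb'
      have h2 := pvGet_len_lt_W graph nb
      have h3 : pvW graph * (pvUnvis graph (visited.add nb) + 1) ≤
          pvW graph * pvUnvis graph visited := Nat.mul_le_mul_left _ h1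
      have h4 : pvW graph * (pvUnvis graph (visited.add nb) + 1) =
          pvW graph * pvUnvis graph (visited.add nb) + pvW graph := Nat.mul_succ _ _
      simp only [pvPhi, List.map_cons, List.sum_cons, List.length_cons]
      omega
    · have h0 : pvGet graph nb = [] := pvGet_nil_of_not_key graph nb hk
      have h3 : pvW graph * pvUnvis graph (visited.add nb) ≤
          pvW graph * pvUnvis graph visited :=
        Nat.mul_le_mul_left _ (pvUnvis_add_le graph visited nb)
      simp only [pvPhi, List.map_cons, List.sum_cons, List.length_cons, h0, List.length_nil]
      omega
  · simp only [pvPhi, List.map_cons, List.sum_cons, List.length_cons]; omega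

-- the 'for root in graph' loop of B
def pvOuterB (graph : List (Int × List Int)) :
    List (Int × List Int) → PySem.Set Int → Option (List Int)
  | [], _ => none
  | (root, _) :: rest, visited =>
    if visited.contains root then
      pvOuterB graph rest visited
    else
      match pvLoopB graph [(root, none, pvGet graph root)] (visited.add root) with
      | (some ans, _) => some ans
      | (none, v') => pvOuterB graph rest v'

def find_cycle_alt (graph : List (Int × List Int)) : Option (List Int) :=
  pvOuterB graph graph PySem.Set.empty

-- ===== PRECONDITION & SPEC =====
def Spec_find_cycle (graph : List (Int × List Int)) (out : Option (List Int)) : Prop := out = find_cycle_alt graph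
instance (graph : List (Int × List Int)) (out : Option (List Int)) : Decidable (Spec_find_cycle graph out) := by unfold Spec_find_cycle; infer_instance

-- ===== CLAIM (what is proved, stated in full; the proofs are below) =====
def Claim_equal_find_cycle : Prop := ∀ (graph : List (Int × List Int)), Dom_find_cycle graph → Spec_find_cycle graph (find_cycle graph)

-- ===== LEMMAS AND PROOFS =====

theorem pvKey_of_get_ne_nil (graph : List (Int × List Int)) (x : Int)
    (h : pvGet graph x ≠ []) : x ∈ graph.map Prod.fst := by
  by_contra hk
  exact h (pvGet_nil_of_not_key graph x hk)

-- visited only grows through dfs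
def pvSub (v w : PySem.Set Int) : Prop := ∀ x, v.contains x → w.contains x

theorem pvSub_refl (v : PySem.Set Int) : pvSub v v := fun _ h => h

theorem pvSub_trans {u v w : PySem.Set Int} (h1 : pvSub u v) (h2 : pvSub v w) : pvSub u w :=
  fun x hx => h2 x (h1 x hx)

theorem pvSub_add (v : PySem.Set Int) (x : Int) : pvSub v (v.add x) :=
  fun y hy => pvContains_add_of_contains v x y hy

theorem pvMonoGo (rec : Int → Option Int → PySem.Set Int → Option ((Bool × List Int) × PySem.Set Int))
    (Hrec : ∀ nb p v r, rec nb p v = some r → pvSub v r.2)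
    (node : Int) (parent : Option Int) :
    ∀ suffix visited r, pvGoA rec node parent suffix visited = some r →
      pvSub visited r.2 := by
  intro suffix
  induction suffix with
  | nil =>
    intro visited r h
    simp only [pvGoA] at h
    cases h
    exact pvSub_refl _
  | cons nb rest ih =>
    intro visited r h
    simp only [pvGoA] at h
    split at h
    · cases hd : rec nb (some node) visited with
      | none => rw [hd] at h; cases h
      | some cr =>
        rw [hd] at h
        obtain ⟨⟨cb, cp⟩, cv⟩ := cr
        have hsub := Hrec nb (some node) visited _ hd
        cases cb with
        | true => cases h; exact hsub
        | false => exact pvSub_trans hsub (ih cv r h)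
    · split at h
      · cases h; exact pvSub_refl _
      · exact ih visited r h

theorem pvMonoDfs (graph : List (Int × List Int)) (fuel : Nat) :
    ∀ node parent visited r, pvDfsA graph fuel node parent visited = some r →
      pvSub visited r.2 := by
  induction fuel with
  | zero => intro _ _ _ _ h; cases h
  | succ f ih =>
    intro node parent visited r h
    simp only [pvDfsA] at h
    exact pvSub_trans (pvSub_add visited node)
      (pvMonoGo (pvDfsA graph f) (fun nb p v r' h' => ih nb p v r' h') node parent _ _ r h)

theorem pvUnvis_mono (graph : List (Int × List Int)) {v w : PySem.Set Int} (h : pvSub v w) :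
    pvUnvis graph w ≤ pvUnvis graph v := by
  unfold pvUnvis
  apply Finset.card_le_card
  intro y hy
  simp only [Finset.mem_filter] at *
  exact ⟨hy.1, fun hc => hy.2 (h y hc)⟩

-- fuel sufficiency: dfs never runs out of fuel when fuel exceeds the unvisited key count
theorem pvGoTotal (graph : List (Int × List Int)) (f : Nat)
    (Hdfs : ∀ nb p v, ¬ v.contains nb → pvUnvis graph v < f →
      (pvDfsA graph f nb p v).isSome) (node : Int) (parent : Option Int) :
    ∀ suffix visited, pvUnvis graph visited < f →
      (pvGoA (pvDfsA graph f) node parent suffix visited).isSome := by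
  intro suffix
  induction suffix with
  | nil => intro visited _; simp [pvGoA]
  | cons nb rest ih =>
    intro visited hv
    simp only [pvGoA]
    split
    · rename_i hnb
      have hs := Hdfs nb (some node) visited (by simpa using hnb) hv
      obtain ⟨⟨⟨cb, cp⟩, cv⟩, hd⟩ := Option.isSome_iff_exists.1 hs
      rw [hd]
      cases cb with
      | true => simp
      | false =>
        have hcv : pvUnvis graph cv ≤ pvUnvis graph visited :=
          pvUnvis_mono graph (pvMonoDfs graph f nb (some node) visited _ hd)
        exact ih cv (by omega)
    · split
      · simp
      · exact ih visited hv

theorem pvTotal (graph : List (Int × List Int)) (fuel : Nat) :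
    ∀ node parent visited, ¬ visited.contains node →
      pvUnvis graph visited < fuel →
      (pvDfsA graph fuel node parent visited).isSome := by
  induction fuel with
  | zero => intro _ _ _ _ h; omega
  | succ f ih =>
    intro node parent visited hn hv
    simp only [pvDfsA]
    by_cases h0 : pvGet graph node = []
    · rw [h0]; simp [pvGoA]
    · have hk : node ∈ graph.map Prod.fst := pvKey_of_get_ne_nil graph node h0
      have hlt := pvUnvis_add_lt graph visited node hk hn
      exact pvGoTotal graph f (fun nb p v hnb hv' => ih nb p v hnb hv') node parent
        (pvGet graph node) (visited.add node) (by omega)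

theorem pvUnvis_le (graph : List (Int × List Int)) (visited : PySem.Set Int) :
    pvUnvis graph visited ≤ graph.length := by
  unfold pvUnvis
  calc ((graph.map Prod.fst).toFinset.filter (fun x => ¬ visited.contains x)).card
      ≤ (graph.map Prod.fst).toFinset.card := Finset.card_filter_le _ _
    _ ≤ (graph.map Prod.fst).length := List.toFinset_card_le _
    _ = graph.length := List.length_map ..

-- simulation: one frame of B's stack runs A's neighbor loop
theorem pvSim (graph : List (Int × List Int)) (fuel : Nat) :
    ∀ suffix node parent visited rest b p v',
      pvGoA (pvDfsA graph fuel) node parent suffix visited = some ((b, p), v') →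
      (b = true →
        (pvLoopB graph ((node, parent, suffix) :: rest) visited).1 =
          some (PySem.Set.ofList ((rest.map (fun f => f.1)).reverse ++ p.reverse))) ∧
      (b = false →
        pvLoopB graph ((node, parent, suffix) :: rest) visited = pvLoopB graph rest v') := by
  induction fuel using Nat.strong_induction_on with
  | _ fuel IHf =>
  intro suffix
  induction suffix with
  | nil =>
    intro node parent visited rest b p v' h
    simp only [pvGoA, Option.some.injEq, Prod.mk.injEq] at h
    obtain ⟨⟨hb, hp⟩, hv⟩ := h
    subst hb; subst hp; subst hv
    refine ⟨fun hbt => (by cases hbt), fun _ => ?_⟩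
    rw [pvLoopB]
  | cons nb rest' ihs =>
    intro node parent visited rest b p v' h
    simp only [pvGoA] at h
    split at h
    · rename_i hnot
      cases hd : pvDfsA graph fuel nb (some node) visited with
      | none => rw [hd] at h; cases h
      | some cr =>
        obtain ⟨⟨cb, cp⟩, cv⟩ := cr
        rw [hd] at h
        cases fuel with
        | zero => simp [pvDfsA] at hd
        | succ cf =>
        simp only [pvDfsA] at hd
        cases cb with
        | true =>
          simp only [Option.some.injEq, Prod.mk.injEq] at h
          obtain ⟨⟨hb, hp⟩, hv⟩ := h
          subst hb; subst hp; subst hv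
          refine ⟨fun _ => ?_, fun hbf => by cases hbf⟩
          have IH := (IHf cf (Nat.lt_succ_self cf) (pvGet graph nb) nb (some node)
            (visited.add nb) ((node, parent, rest') :: rest) true cp cv hd).1 rfl
          rw [pvLoopB, if_pos hnot, IH]
          simp [List.append_assoc]
        | false =>
          have step : pvLoopB graph ((node, parent, nb :: rest') :: rest) visited =
              pvLoopB graph ((node, parent, rest') :: rest) cv := by
            have := (IHf cf (Nat.lt_succ_self cf) (pvGet graph nb) nb (some node)
              (visited.add nb) ((node, parent, rest') :: rest) false cp cv hd).2 rfl
            rw [pvLoopB, if_pos hnot]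
            exact this
          have IH := ihs node parent cv rest b p v' h
          exact ⟨fun hb => by rw [step]; exact IH.1 hb,
                 fun hb => by rw [step]; exact IH.2 hb⟩
    · rename_i hcon
      split at h
      · rename_i hpar
        simp only [Option.some.injEq, Prod.mk.injEq] at h
        obtain ⟨⟨hb, hp⟩, hv⟩ := h
        subst hb; subst hp; subst hv
        refine ⟨fun _ => ?_, fun hbf => by cases hbf⟩
        rw [pvLoopB, if_neg hcon, if_pos hpar]
        simp
      · rename_i hpar
        have IH := ihs node parent visited rest b p v' h
        have step : pvLoopB graph ((node, parent, nb :: rest') :: rest) visited =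
            pvLoopB graph ((node, parent, rest') :: rest) visited := by
          rw [pvLoopB, if_neg hcon, if_neg hpar]
        exact ⟨fun hb => by rw [step]; exact IH.1 hb,
               fun hb => by rw [step]; exact IH.2 hb⟩

theorem pvOuterEq (graph : List (Int × List Int)) :
    ∀ entries visited, pvOuterA graph entries visited = pvOuterB graph entries visited := by
  intro entries
  induction entries with
  | nil => intro visited; rfl
  | cons e rest ih =>
    intro visited
    obtain ⟨node, val⟩ := e
    by_cases hc : visited.contains node
    · simp only [pvOuterA, pvOuterB, if_pos hc, if_neg (not_not_intro hc)]
      exact ih visited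
    · have htot := pvTotal graph (graph.length + 1) node none visited hc
        (by have := pvUnvis_le graph visited; omega)
      obtain ⟨⟨⟨b, path⟩, v'⟩, hd⟩ := Option.isSome_iff_exists.1 htot
      have hd' : pvGoA (pvDfsA graph graph.length) node none (pvGet graph node)
          (visited.add node) = some ((b, path), v') := by
        simpa only [pvDfsA] using hd
      have hsim := pvSim graph graph.length (pvGet graph node) node none
        (visited.add node) [] b path v' hd'
      simp only [pvOuterA, pvOuterB, if_pos hc, if_neg hc, hd]
      cases b with
      | true =>
        have h1 := hsim.1 rfl
        rcases hlv : pvLoopB graph [(node, none, pvGet graph node)] (visited.add node)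
          with ⟨o, w⟩
        rw [hlv] at h1
        simp only at h1
        subst h1
        simp
      | false =>
        have h2 := hsim.2 rfl
        rw [h2]
        simp only [pvLoopB]
        exact ih v'

-- ===== VERDICT (by name: the statement is the Claim_ definition above) =====
theorem find_cycle_spec : Claim_equal_find_cycle := by
  intro graph _
  unfold Spec_find_cycle find_cycle find_cycle_alt
  rcases eq_or_ne graph [] with h | h
  · subst h; simp [pvOuterB]
  · simp [h, pvOuterEq]
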